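-- pv_equiv track=rewrite | github.com/fsv-unterjesingen/fsv-unterjesingen.github.io | scripts/import_wordpress_media.py | count_duplicate_hash_groups
-- ===== SOURCE A (Python) =====
-- from collections import Counter, defaultdict
-- from typing import Any, Iterator
--
-- def count_duplicate_hash_groups(imported_media: list[dict[str, Any]]) -> dict[str, int]:
--     by_hash: dict[str, int] = defaultdict(int)
--     for item in imported_media:
--         sha256 = item.get("sha256")
--         if sha256:
--             by_hash[str(sha256)] += 1
--
--     groups = 0
--     files = 0
--     for count in by_hash.values():
--         if count > 1:
--             groups += 1
--             files += count
--     return {"groups": groups, "files": files}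
-- ===== SOURCE B (Python) =====
-- def count_duplicate_hash_groups(imported_media):
--     counts = {}
--     groups = 0
--     files = 0
--     for item in imported_media:
--         sha256 = item.get("sha256")
--         if not sha256:
--             continue
--         key = str(sha256)
--         c = counts.get(key, 0) + 1
--         counts[key] = c
--         if c == 2:
--             groups += 1
--             files += 2
--         elif c > 2:
--             files += 1
--     return {"groups": groups, "files": files}
-- ===== Notes on version B (the rewrite author's own statement) =====
-- stated objective: alternative
-- what changed: B folds groups/files totals into the counting loop itself (adding 1 group and 2 files when a hash's count reaches exactly 2, and 1 file thereafter), so the second pass over the counter's values disappears.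
import Mathlib
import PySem

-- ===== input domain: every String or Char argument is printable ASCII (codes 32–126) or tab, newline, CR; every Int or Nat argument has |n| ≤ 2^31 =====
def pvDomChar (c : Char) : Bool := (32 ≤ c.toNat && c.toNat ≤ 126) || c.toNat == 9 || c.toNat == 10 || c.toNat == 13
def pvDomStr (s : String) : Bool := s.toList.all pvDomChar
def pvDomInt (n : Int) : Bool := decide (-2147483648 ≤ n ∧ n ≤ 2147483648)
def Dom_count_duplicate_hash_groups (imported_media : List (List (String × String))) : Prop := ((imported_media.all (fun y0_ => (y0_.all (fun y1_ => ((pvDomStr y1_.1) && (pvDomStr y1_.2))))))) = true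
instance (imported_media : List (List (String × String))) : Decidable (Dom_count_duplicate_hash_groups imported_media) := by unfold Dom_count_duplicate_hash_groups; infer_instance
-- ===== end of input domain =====

-- B replaces A's two passes (build the full hash counter, then scan its values) by a single pass
-- that updates the group/file totals while counting; objective: alternative decomposition.

-- ===== PORT A =====
-- two passes: build by_hash, then fold over its values
def count_duplicate_hash_groups (imported_media : List (List (String × String))) : List (String × Int) :=
  let by_hash : PySem.Dict String Int :=
    imported_media.foldl (fun d item =>
      match (PySem.Dict.mk item).get? "sha256" with   -- item.get("sha256")
      | some s => if s = "" then d else d.modify s 0 (· + 1)  -- 'if sha256:' (str truthiness); by_hash[str(sha256)] += 1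
      | none => d) PySem.Dict.empty
  let gf : Int × Int :=
    by_hash.values.foldl (fun gf count =>
      if count > 1 then (gf.1 + 1, gf.2 + count) else gf) (0, 0)
  [("groups", gf.1), ("files", gf.2)]

-- ===== PORT B =====
-- single pass keeping (counts, groups, files)
def count_duplicate_hash_groups_alt (imported_media : List (List (String × String))) : List (String × Int) :=
  let st : PySem.Dict String Int × Int × Int :=
    imported_media.foldl (fun st item =>
      match (PySem.Dict.mk item).get? "sha256" with   -- item.get("sha256")
      | some s =>
        if s = "" then st else                         -- 'if not sha256: continue'
          let c : Int := st.1.getD s 0 + 1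
          (st.1.insert s c,
           (if c = 2 then st.2.1 + 1 else st.2.1),
           (if c = 2 then st.2.2 + 2 else if c > 2 then st.2.2 + 1 else st.2.2))
      | none => st) (PySem.Dict.empty, 0, 0)
  [("groups", st.2.1), ("files", st.2.2)]

-- ===== PRECONDITION & SPEC =====
def Spec_count_duplicate_hash_groups (imported_media : List (List (String × String))) (out : List (String × Int)) : Prop := out = count_duplicate_hash_groups_alt imported_media
instance (imported_media : List (List (String × String))) (out : List (String × Int)) : Decidable (Spec_count_duplicate_hash_groups imported_media out) := by unfold Spec_count_duplicate_hash_groups; infer_instance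

-- ===== CLAIM (what is proved, stated in full; the proofs are below) =====
def Claim_equal_count_duplicate_hash_groups : Prop := ∀ (imported_media : List (List (String × String))), Dom_count_duplicate_hash_groups imported_media → Spec_count_duplicate_hash_groups imported_media (count_duplicate_hash_groups imported_media)

-- ===== LEMMAS AND PROOFS =====

-- the list of keys both loops actually count
def pvKeys (imported_media : List (List (String × String))) : List String :=
  imported_media.filterMap (fun item =>
    match (PySem.Dict.mk item).get? "sha256" with
    | some s => if s = "" then none else some s
    | none => none)

-- a fold over items that skips missing/empty keys is a fold over pvKeys
theorem pvFoldl_keys {σ : Type} (g : σ → String → σ) (m : List (List (String × String))) (init : σ) :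
    m.foldl (fun st item =>
      match (PySem.Dict.mk item).get? "sha256" with
      | some s => if s = "" then st else g st s
      | none => st) init = (pvKeys m).foldl g init := by
  induction m generalizing init with
  | nil => rfl
  | cons item rest ih =>
    simp only [pvKeys, List.filterMap_cons, List.foldl_cons]
    cases h : (PySem.Dict.mk item).get? "sha256" with
    | none => simpa [pvKeys] using ih init
    | some s =>
      by_cases hs : s = "" <;> simp [hs] <;> [skip; exact ih (g init s)]
      exact ih init

-- the instance of pvFoldl_keys used for A's first loop (stated with the step inlined so 'rw' applies)
theorem pvFoldl_keys_A (m : List (List (String × String))) (init : PySem.Dict String Int) :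
    m.foldl (fun d item =>
      match (PySem.Dict.mk item).get? "sha256" with
      | some s => if s = "" then d else d.modify s 0 (· + 1)
      | none => d) init = (pvKeys m).foldl (fun d s => d.modify s 0 (· + 1)) init :=
  pvFoldl_keys _ m init

-- Σ over the distinct elements of l of F (multiplicity of the element), for F with F 0 = 0
def pvSumF (F : ℕ → Int) (l : List String) : Int :=
  ∑ k ∈ l.toFinset, F (l.count k)

theorem pvSumF_append (F : ℕ → Int) (hF0 : F 0 = 0) (l : List String) (x : String) :
    pvSumF F (l ++ [x]) = pvSumF F l + F (l.count x + 1) - F (l.count x) := by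
  unfold pvSumF
  have hc : ∀ k, k ≠ x → (l ++ [x]).count k = l.count k := by
    intro k h
    simp [List.count_append, Ne.symm h]
  have hcx : (l ++ [x]).count x = l.count x + 1 := by simp [List.count_append]
  by_cases hx : x ∈ l
  · have hset : (l ++ [x]).toFinset = l.toFinset := by simp [List.toFinset_append, hx]
    have hxs : x ∈ l.toFinset := List.mem_toFinset.mpr hx
    rw [hset, ← Finset.add_sum_erase _ _ hxs, ← Finset.add_sum_erase _ (fun k => F (l.count k)) hxs]
    have hrest : ∑ k ∈ l.toFinset.erase x, F ((l ++ [x]).count k)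
        = ∑ k ∈ l.toFinset.erase x, F (l.count k) :=
      Finset.sum_congr rfl (fun k hk => by rw [hc k (Finset.ne_of_mem_erase hk)])
    rw [hrest, hcx]; ring
  · have hset : (l ++ [x]).toFinset = insert x l.toFinset := by
      simp [List.toFinset_append]
    have hxs : x ∉ l.toFinset := fun h => hx (List.mem_toFinset.mp h)
    have hl0 : l.count x = 0 := List.count_eq_zero.mpr hx
    rw [hset, Finset.sum_insert hxs, hcx, hl0]
    have hrest : ∑ k ∈ l.toFinset, F ((l ++ [x]).count k)
        = ∑ k ∈ l.toFinset, F (l.count k) :=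
      Finset.sum_congr rfl (fun k hk => by rw [hc k (fun h => hxs (h ▸ hk))])
    rw [hrest, hF0]; ring

-- the two totals both programs compute: number of keys with count > 1, and their total count
def pvG (l : List String) : Int := pvSumF (fun c => if 1 < c then 1 else 0) l
def pvF (l : List String) : Int := pvSumF (fun c => if 1 < c then (c : Int) else 0) l

theorem pvSum_ofList (f : String → Int) (l : List String) :
    ((PySem.Set.ofList l).map f).sum = ∑ k ∈ l.toFinset, f k := by
  rw [← List.sum_toFinset f (PySem.Set.nodup_ofList l)]
  congr 1
  ext k
  simp [PySem.Set.mem_ofList]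

-- A's second pass computes the two sums over the values list
theorem pvFoldGF (vs : List Int) (g f : Int) :
    vs.foldl (fun gf count => if count > 1 then (gf.1 + 1, gf.2 + count) else gf) (g, f)
      = (g + (vs.map (fun c => if 1 < c then (1 : Int) else 0)).sum,
         f + (vs.map (fun c => if 1 < c then c else 0)).sum) := by
  induction vs generalizing g f with
  | nil => simp
  | cons c rest ih =>
    by_cases h : (1 : Int) < c
    · simp [h, ih]
      constructor <;> ring
    · simp [h, ih]

theorem pvA_eq (m : List (List (String × String))) :
    count_duplicate_hash_groups m = [("groups", pvG (pvKeys m)), ("files", pvF (pvKeys m))] := by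
  simp only [count_duplicate_hash_groups]
  rw [pvFoldl_keys_A, ← PySem.Dict.counter_eq_foldl, pvFoldGF]
  have hv : (PySem.Dict.counter (pvKeys m) : PySem.Dict String Int).values
      = (PySem.Set.ofList (pvKeys m)).map (fun k => ((pvKeys m).count k : Int)) := by
    show (PySem.Dict.counter (pvKeys m)).items.map (·.2) = _
    rw [PySem.Dict.items_counter]
    simp [List.map_map, Function.comp]
  rw [hv]
  simp only [List.map_map]
  rw [pvSum_ofList, pvSum_ofList]
  unfold pvG pvF pvSumF
  rw [zero_add, zero_add]
  congr 1
  · congr 1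
    exact Finset.sum_congr rfl fun k _ => by simp [Function.comp, Nat.one_lt_cast]
  · congr 2
    exact Finset.sum_congr rfl fun k _ => by simp [Function.comp, Nat.one_lt_cast]

-- B's single pass maintains (counter of the keys seen, pvG, pvF)
theorem pvB_fold (l : List String) :
    l.foldl (fun (st : PySem.Dict String Int × Int × Int) s =>
        let c : Int := st.1.getD s 0 + 1
        (st.1.insert s c,
         (if c = 2 then st.2.1 + 1 else st.2.1),
         (if c = 2 then st.2.2 + 2 else if c > 2 then st.2.2 + 1 else st.2.2)))
      (PySem.Dict.empty, 0, 0)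
      = (PySem.Dict.counter l, pvG l, pvF l) := by
  induction l using List.reverseRecOn with
  | nil => rfl
  | append_singleton p x ih =>
    rw [List.foldl_append, ih]
    simp only [List.foldl_cons, List.foldl_nil]
    have hg : PySem.Dict.getD (PySem.Dict.counter p) x 0 = (p.count x : Int) :=
      PySem.Dict.getD_counter p x
    have hdict : (PySem.Dict.counter p).insert x (PySem.Dict.getD (PySem.Dict.counter p) x 0 + 1)
        = PySem.Dict.counter (p ++ [x]) := by
      rw [← PySem.Dict.foldl_insert_getD_add_one_eq_counter p,
          ← PySem.Dict.foldl_insert_getD_add_one_eq_counter (p ++ [x]), List.foldl_append]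
      rfl
    have hGa := pvSumF_append (fun c => if 1 < c then 1 else 0) (by simp) p x
    have hFa := pvSumF_append (fun c => if 1 < c then (c : Int) else 0) (by simp) p x
    refine Prod.ext hdict (Prod.ext ?_ ?_) <;> simp only [hg]
    · show (if (p.count x : Int) + 1 = 2 then pvG p + 1 else pvG p) = pvG (p ++ [x])
      unfold pvG; rw [hGa]
      rcases Nat.lt_or_ge (p.count x) 2 with h | h
      · interval_cases h' : p.count x <;> simp
      · have h1 : ¬ ((p.count x : Int) + 1 = 2) := by omega
        have h2 : 1 < p.count x + 1 := by omega
        have h3 : 1 < p.count x := by omega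
        simp [h1, h2, h3]
    · show (if (p.count x : Int) + 1 = 2 then pvF p + 2 else if (p.count x : Int) + 1 > 2 then pvF p + 1 else pvF p) = pvF (p ++ [x])
      unfold pvF; rw [hFa]
      rcases Nat.lt_or_ge (p.count x) 2 with h | h
      · interval_cases h' : p.count x <;> simp
      · have h1 : ¬ ((p.count x : Int) + 1 = 2) := by omega
        have h2 : 1 < p.count x + 1 := by omega
        have h3 : 1 < p.count x := by omega
        have h4 : (p.count x : Int) + 1 > 2 := by omega
        simp [h1, h2, h3, h4]
        ring

-- ===== VERDICT (by name: the statement is the Claim_ definition above) =====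
theorem count_duplicate_hash_groups_spec : Claim_equal_count_duplicate_hash_groups := by
  intro m _
  show count_duplicate_hash_groups m = count_duplicate_hash_groups_alt m
  rw [pvA_eq]
  simp only [count_duplicate_hash_groups_alt]
  rw [pvFoldl_keys (fun st s =>
        let c : Int := st.1.getD s 0 + 1
        (st.1.insert s c,
         (if c = 2 then st.2.1 + 1 else st.2.1),
         (if c = 2 then st.2.2 + 2 else if c > 2 then st.2.2 + 1 else st.2.2))) m (PySem.Dict.empty, 0, 0)]
  rw [pvB_fold]
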